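-- pv_equiv track=rewrite | github.com/ViniciusEZ/Codewars | python/7kyu/scrolling_text.py | scrolling_text
-- ===== SOURCE A (Python) =====
-- def scrolling_text(text):
--     answer = []
--     word = text
--
--     while len(answer) != len(text):
--         word = list(word)
--         letter = word.pop()
--         word = letter + ''.join(word)
--         answer.append(word.upper())
--
--
--
--     return answer[::-1]
-- ===== SOURCE B (Python) =====
-- def scrolling_text(text):
--     return [(text[i:] + text[:i]).upper() for i in range(len(text))]
-- ===== Notes on version B (the rewrite author's own statement) =====
-- stated objective: simpler
-- what changed: Replaces the stateful while-loop that carries a mutated word (pop last char, prepend, append, reverse at the end) with a one-line comprehension computing each rotation independently by slicing the original text at index i.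
import Mathlib
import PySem

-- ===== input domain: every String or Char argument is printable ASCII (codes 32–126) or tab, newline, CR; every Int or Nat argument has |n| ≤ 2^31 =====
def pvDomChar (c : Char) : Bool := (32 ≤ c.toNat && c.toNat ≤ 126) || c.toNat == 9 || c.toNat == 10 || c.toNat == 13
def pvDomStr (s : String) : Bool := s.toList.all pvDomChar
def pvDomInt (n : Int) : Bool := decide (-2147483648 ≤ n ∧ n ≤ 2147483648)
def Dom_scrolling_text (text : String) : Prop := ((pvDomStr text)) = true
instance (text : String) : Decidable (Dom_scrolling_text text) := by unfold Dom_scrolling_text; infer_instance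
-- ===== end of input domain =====

-- B replaces A's stateful rotate-and-reverse loop with a direct slice-based comprehension (simpler decomposition).

-- ===== PORT A =====
-- the while loop: runs until len(answer) == len(text); answer grows by one each
-- iteration, so 'fuel' = len(text) - len(answer) counts the remaining iterations.
def scrollingLoopA : Nat → List Char → List String → List String
  | 0, _, answer => answer
  | n + 1, word, answer =>
    match word.getLast? with           -- letter = word.pop()
    | none => answer                    -- pop on empty word: unreachable (loop body needs nonempty text)
    | some letter =>
      let word' := letter :: word.dropLast          -- word = letter + ''.join(word)
      scrollingLoopA n word' (answer ++ [String.ofList (PySem.Chars.upper word')])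

def scrolling_text (text : String) : List String :=
  (scrollingLoopA text.toList.length text.toList []).reverse   -- return answer[::-1]

-- ===== PORT B =====
def scrolling_text_alt (text : String) : List String :=
  (List.range text.toList.length).map (fun (i : Nat) =>
    String.ofList (PySem.Chars.upper
      (PySem.List.slice text.toList (some (i : Int)) none ++
       PySem.List.slice text.toList none (some (i : Int)))))

-- ===== PRECONDITION & SPEC =====
def Spec_scrolling_text (text : String) (out : List String) : Prop := out = scrolling_text_alt text
instance (text : String) (out : List String) : Decidable (Spec_scrolling_text text out) := by unfold Spec_scrolling_text; infer_instance

-- ===== CLAIM (what is proved, stated in full; the proofs are below) =====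
def Claim_equal_scrolling_text : Prop := ∀ (text : String), Dom_scrolling_text text → Spec_scrolling_text text (scrolling_text text)

-- ===== LEMMAS AND PROOFS =====

-- left rotation by i: what B computes at index i, and (as rotL k) A's word when k iterations remain
def rotL (i : Nat) (t : List Char) : List Char := t.drop i ++ t.take i

theorem rotL_length_eq (t : List Char) : rotL t.length t = t := by
  simp [rotL]

-- one backward step of the rotation: popping the last char of rotL (k+1) t and
-- prepending it yields rotL k t
theorem rot_step (t : List Char) (k : Nat) (hk : k < t.length) :
    (rotL (k + 1) t).getLast? = some t[k] ∧
      t[k] :: (rotL (k + 1) t).dropLast = rotL k t := by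
  have htake : t.take (k + 1) = t.take k ++ [t[k]] := by
    rw [List.take_add_one]
    simp [List.getElem?_eq_getElem hk]
  have h1 : rotL (k + 1) t = (t.drop (k + 1) ++ t.take k) ++ [t[k]] := by
    rw [rotL, htake, ← List.append_assoc]
  have hdrop : t.drop k = t[k] :: t.drop (k + 1) := List.drop_eq_getElem_cons hk
  constructor
  · rw [h1, List.getLast?_concat]
  · rw [h1, List.dropLast_concat, rotL, hdrop, List.cons_append]

theorem loop_eq (k : Nat) (t : List Char) (acc : List String) (hk : k ≤ t.length) :
    scrollingLoopA k (rotL k t) acc =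
      acc ++ ((List.range k).map
        (fun i => String.ofList (PySem.Chars.upper (rotL i t)))).reverse := by
  induction k generalizing acc with
  | zero => simp [scrollingLoopA]
  | succ k ih =>
    have hk' : k < t.length := hk
    obtain ⟨hlast, hcons⟩ := rot_step t k hk'
    rw [scrollingLoopA, hlast]
    simp only [hcons]
    rw [ih (acc ++ [String.ofList (PySem.Chars.upper (rotL k t))]) (Nat.le_of_lt hk')]
    rw [List.range_succ]
    simp

theorem scrolling_text_spec : Claim_equal_scrolling_text := by
  intro text _
  unfold Spec_scrolling_text scrolling_text scrolling_text_alt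
  set t := text.toList with ht
  have h0 : scrollingLoopA t.length t [] =
      ((List.range t.length).map
        (fun i => String.ofList (PySem.Chars.upper (rotL i t)))).reverse := by
    have := loop_eq t.length t [] (le_refl _)
    rwa [rotL_length_eq, List.nil_append] at this
  rw [h0, List.reverse_reverse]
  apply List.map_congr_left
  intro i hi
  rw [PySem.List.slice_from_natCast, PySem.List.slice_to_natCast]
  rfl
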